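-- pv_equiv track=rewrite | github.com/Teome0245/LBG_IA_MMORPG | LBG_IA_MMO/orchestrator/services/action_proposal.py | _extract_after
-- ===== SOURCE A (Python) =====
-- def _extract_after(raw: str, markers: tuple[str, ...]) -> str:
--     lower = raw.lower()
--     best: tuple[int, int, str] | None = None
--     for marker in sorted(markers, key=len, reverse=True):
--         idx = lower.find(marker.lower())
--         if idx < 0:
--             continue
--         end = idx + len(marker)
--         if best is None or idx < best[0] or (idx == best[0] and end > best[1]):
--             best = (idx, end, marker)
--     if best is None:
--         return ""
--     return raw[best[1] :].strip(" :,-\"'")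
-- ===== SOURCE B (Python) =====
-- def _extract_after(raw: str, markers: tuple[str, ...]) -> str:
--     # Single left-to-right scan over positions; at each position try the
--     # markers longest-first and return on the first hit.
--     lower = raw.lower()
--     lowered = [m.lower() for m in sorted(markers, key=len, reverse=True)]
--     for pos in range(len(lower) + 1):
--         for m in lowered:
--             if lower.startswith(m, pos):
--                 return raw[pos + len(m):].strip(" :,-\"'")
--     return ""
-- ===== Notes on version B (the rewrite author's own statement) =====
-- stated objective: faster
-- what changed: Replaces the per-marker full-string find() scans with running-best (idx,end) bookkeeping by a single left-to-right scan over positions of the lowered string, trying the longest-first sorted markers with startswith at each position and returning at the first hit, so the scan stops at the earliest match instead of running every marker's find() over the whole string.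
import Mathlib
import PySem

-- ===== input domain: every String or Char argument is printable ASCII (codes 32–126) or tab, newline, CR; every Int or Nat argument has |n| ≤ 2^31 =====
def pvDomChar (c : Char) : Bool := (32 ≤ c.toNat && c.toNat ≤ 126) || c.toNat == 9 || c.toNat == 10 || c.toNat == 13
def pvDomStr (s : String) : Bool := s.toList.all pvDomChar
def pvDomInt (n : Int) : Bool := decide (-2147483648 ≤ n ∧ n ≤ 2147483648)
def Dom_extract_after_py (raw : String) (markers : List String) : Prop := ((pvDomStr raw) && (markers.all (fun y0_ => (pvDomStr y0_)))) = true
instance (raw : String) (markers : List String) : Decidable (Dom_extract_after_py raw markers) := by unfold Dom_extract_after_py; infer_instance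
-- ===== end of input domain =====

-- B replaces A's per-marker full-string find() scans with best-(idx,end) bookkeeping by a
-- single left-to-right scan over positions trying the longest-first markers at each position
-- and stopping at the first hit (measurably faster: the scan ends at the earliest match).

-- ===== PORT A =====
-- one iteration of A's 'for marker in sorted(markers, key=len, reverse=True)' loop
def aStep (lower : String) (best : Option (Int × Int × String)) (marker : String) :
    Option (Int × Int × String) :=
  let idx := PySem.Str.find lower (PySem.Str.lower marker)
  if idx < 0 then best
  else
    let e := idx + PySem.Str.len marker
    match best with
    | none => some (idx, e, marker)
    | some b => if idx < b.1 ∨ (idx = b.1 ∧ e > b.2.1) then some (idx, e, marker) else best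

def extract_after_py (raw : String) (markers : List String) : String :=
  let lower := PySem.Str.lower raw
  match (PySem.List.sorted markers (fun m => PySem.Str.len m) true).foldl (aStep lower) none with
  | none => ""
  | some b => PySem.Str.stripChars (PySem.Str.slice raw (some b.2.1) none) " :,-\"'"

-- ===== PORT B =====
-- 'for pos in range(len(lower) + 1): for m in lowered: if lower.startswith(m, pos): return …'
-- lower.startswith(m, pos) with 0 ≤ pos is exactly PySem.Chars.startswith (lower.drop pos) m,
-- and raw[pos + len(m):] with a nonnegative index is exactly List.drop (both exact here).
def bScan (raw : String) (lower : List Char) (lowered : List (List Char)) :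
    Nat → Nat → String
  | 0, _ => ""
  | fuel + 1, pos =>
    match lowered.find? (fun m => PySem.Chars.startswith (lower.drop pos) m) with
    | some m => PySem.Str.stripChars (String.ofList (raw.toList.drop (pos + m.length))) " :,-\"'"
    | none => bScan raw lower lowered fuel (pos + 1)

def extract_after_py_alt (raw : String) (markers : List String) : String :=
  let lower := (PySem.Str.lower raw).toList
  let lowered := (PySem.List.sorted markers (fun m => PySem.Str.len m) true).map
    (fun m => (PySem.Str.lower m).toList)
  bScan raw lower lowered (lower.length + 1) 0

-- ===== PRECONDITION & SPEC =====
def Spec_extract_after_py (raw : String) (markers : List String) (out : String) : Prop := out = extract_after_py_alt raw markers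
instance (raw : String) (markers : List String) (out : String) : Decidable (Spec_extract_after_py raw markers out) := by unfold Spec_extract_after_py; infer_instance

-- ===== CLAIM (what is proved, stated in full; the proofs are below) =====
def Claim_equal_extract_after_py : Prop := ∀ (raw : String) (markers : List String), Dom_extract_after_py raw markers → Spec_extract_after_py raw markers (extract_after_py raw markers)

-- ===== LEMMAS AND PROOFS =====

-- invariant of A's fold: after processing markers 'done', 'best' is none iff no marker was
-- found, else holds the minimal index and, at that index, the maximal end
def GoodA (lower : String) (done : List String) : Option (Int × Int × String) → Prop
  | none => ∀ m ∈ done, PySem.Str.find lower (PySem.Str.lower m) = -1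
  | some b =>
      0 ≤ b.1 ∧
      (∃ m ∈ done, PySem.Str.find lower (PySem.Str.lower m) = b.1 ∧
        b.2.1 = b.1 + PySem.Str.len m) ∧
      (∀ m ∈ done, 0 ≤ PySem.Str.find lower (PySem.Str.lower m) →
        b.1 ≤ PySem.Str.find lower (PySem.Str.lower m) ∧
        (PySem.Str.find lower (PySem.Str.lower m) = b.1 →
          b.1 + PySem.Str.len m ≤ b.2.1))

lemma length_toList_lower (m : String) : (PySem.Str.lower m).toList.length = m.toList.length := by
  simp [PySem.Chars.lower]

lemma find_nonneg_of_prefix_drop {L sub : List Char} {q : Nat} (hpre : sub <+: L.drop q) :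
    0 ≤ PySem.Chars.find L sub := by
  rw [PySem.Chars.find_nonneg_iff]
  exact (PySem.Chars.isIn_iff_infix _ _).1
    ((PySem.Chars.exists_prefix_drop_iff_isIn _ _).1 ⟨q, hpre⟩)

lemma find_le_of_prefix_drop {L sub : List Char} {q : Nat} (hpre : sub <+: L.drop q) :
    PySem.Chars.find L sub ≤ (q : Int) := by
  have h0 := find_nonneg_of_prefix_drop hpre
  by_contra hlt
  push_neg at hlt
  exact (PySem.Chars.find_spec h0).2 q (by omega) hpre



lemma aStep_good (lower : String) (done : List String) (acc : Option (Int × Int × String))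
    (m : String) (h : GoodA lower done acc) :
    GoodA lower (done ++ [m]) (aStep lower acc m) := by
  have hge : -1 ≤ PySem.Str.find lower (PySem.Str.lower m) := by
    rw [PySem.Str.find_eq]; exact PySem.Chars.neg_one_le_find _ _
  have hlen0 : 0 ≤ PySem.Str.len m := by rw [PySem.Str.len_eq]; positivity
  simp only [aStep]
  by_cases hneg : PySem.Str.find lower (PySem.Str.lower m) < 0
  · rw [if_pos hneg]
    cases acc with
    | none =>
        simp only [GoodA] at h ⊢
        intro m' hm'
        rcases List.mem_append.1 hm' with h' | h'
        · exact h m' h'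
        · rcases List.mem_singleton.1 h' with rfl
          omega
    | some b =>
        simp only [GoodA] at h ⊢
        obtain ⟨h0, ⟨mw, hmw, hfw, hew⟩, hopt⟩ := h
        refine ⟨h0, ⟨mw, List.mem_append_left _ hmw, hfw, hew⟩, ?_⟩
        intro m' hm' hf'
        rcases List.mem_append.1 hm' with h' | h'
        · exact hopt m' h' hf'
        · rcases List.mem_singleton.1 h' with rfl
          omega
  · rw [if_neg hneg]
    push_neg at hneg
    cases acc with
    | none =>
        simp only [GoodA] at h ⊢
        refine ⟨hneg, ⟨m, List.mem_append_right _ (List.mem_singleton.2 rfl), rfl, rfl⟩, ?_⟩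
        intro m' hm' hf'
        rcases List.mem_append.1 hm' with h' | h'
        · have := h m' h'; omega
        · rcases List.mem_singleton.1 h' with rfl
          exact ⟨le_refl _, fun _ => le_refl _⟩
    | some b =>
        obtain ⟨bi, be, bm⟩ := b
        simp only [GoodA] at h ⊢
        obtain ⟨h0, ⟨mw, hmw, hfw, hew⟩, hopt⟩ := h
        by_cases hcond : PySem.Str.find lower (PySem.Str.lower m) < bi ∨
            (PySem.Str.find lower (PySem.Str.lower m) = bi ∧
             PySem.Str.find lower (PySem.Str.lower m) + PySem.Str.len m > be)
        · rw [if_pos hcond]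
          dsimp only
          refine ⟨hneg, ⟨m, List.mem_append_right _ (List.mem_singleton.2 rfl), rfl, rfl⟩, ?_⟩
          intro m' hm' hf'
          rcases List.mem_append.1 hm' with h' | h'
          · obtain ⟨hle, htie⟩ := hopt m' h' hf'
            rcases hcond with hlt | ⟨heq, hgt⟩
            · exact ⟨by omega, fun hteq => by omega⟩
            · refine ⟨by omega, fun hteq => ?_⟩
              have := htie (by omega)
              omega
          · rcases List.mem_singleton.1 h' with rfl
            exact ⟨le_refl _, fun _ => le_refl _⟩
        · rw [if_neg hcond]
          dsimp only
          push_neg at hcond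
          obtain ⟨hc1, hc2⟩ := hcond
          refine ⟨h0, ⟨mw, List.mem_append_left _ hmw, hfw, hew⟩, ?_⟩
          intro m' hm' hf'
          rcases List.mem_append.1 hm' with h' | h'
          · exact hopt m' h' hf'
          · rcases List.mem_singleton.1 h' with rfl
            refine ⟨hc1, fun he => ?_⟩
            have := hc2 he
            omega

lemma foldA_good (lower : String) (ms : List String) :
    ∀ (done : List String) (acc : Option (Int × Int × String)), GoodA lower done acc →
      GoodA lower (done ++ ms) (ms.foldl (aStep lower) acc) := by
  induction ms with
  | nil => intro done acc h; simpa using h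
  | cons m t ih =>
      intro done acc h
      have := ih (done ++ [m]) (aStep lower acc m) (aStep_good lower done acc m h)
      simpa using this

lemma bScan_none (raw : String) (L : List Char) (lowered : List (List Char))
    (h : ∀ p ∈ lowered, ∀ q : Nat, ¬ (PySem.Chars.startswith (L.drop q) p = true)) :
    ∀ (fuel pos : Nat), bScan raw L lowered fuel pos = "" := by
  intro fuel
  induction fuel with
  | zero => intro pos; rfl
  | succ f ih =>
      intro pos
      have hn : lowered.find? (fun m => PySem.Chars.startswith (L.drop pos) m) = none := by
        apply List.find?_eq_none.mpr
        intro p hp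
        simpa using h p hp pos
      simp [bScan, hn, ih]

lemma bScan_hit (raw : String) (L : List Char) (lowered : List (List Char)) (i : Nat)
    (hiL : i ≤ L.length) (p₀ : List Char)
    (hfind : lowered.find? (fun m => PySem.Chars.startswith (L.drop i) m) = some p₀) :
    ∀ (pos : Nat), pos ≤ i →
    (∀ q : Nat, q < i → ∀ p ∈ lowered, ¬ (PySem.Chars.startswith (L.drop q) p = true)) →
    bScan raw L lowered (L.length + 1 - pos) pos
      = PySem.Str.stripChars (String.ofList (raw.toList.drop (i + p₀.length))) " :,-\"'" := by
  suffices H : ∀ (gap pos : Nat), pos + gap = i →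
      (∀ q : Nat, q < i → ∀ p ∈ lowered, ¬ (PySem.Chars.startswith (L.drop q) p = true)) →
      bScan raw L lowered (L.length + 1 - pos) pos
        = PySem.Str.stripChars (String.ofList (raw.toList.drop (i + p₀.length))) " :,-\"'" by
    intro pos hpos h
    exact H (i - pos) pos (by omega) h
  intro gap
  induction gap with
  | zero =>
      intro pos hpi h
      have hpe : pos = i := by omega
      subst hpe
      have hfe : L.length + 1 - pos = (L.length - pos) + 1 := by omega
      rw [hfe]
      simp only [bScan, hfind]
  | succ g ih =>
      intro pos hpi h
      have hn : lowered.find? (fun m => PySem.Chars.startswith (L.drop pos) m) = none :=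
        List.find?_eq_none.2 (fun p hp => by simpa using h pos (by omega) p hp)
      have hfe : L.length + 1 - pos = (L.length - pos) + 1 := by omega
      rw [hfe]
      simp only [bScan, hn]
      have h2 : L.length - pos = L.length + 1 - (pos + 1) := by omega
      rw [h2]
      exact ih (pos + 1) (by omega) h

lemma find?_max_len {p : List Char → Bool} {l : List (List Char)} {p₀ x : List Char}
    (hpw : l.Pairwise (fun a b : List Char => b.length ≤ a.length))
    (hf : l.find? p = some p₀) (hx : x ∈ l) (hpx : p x = true) : x.length ≤ p₀.length := by
  induction l with
  | nil => cases hx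
  | cons a t ih =>
      rcases List.pairwise_cons.1 hpw with ⟨ha, ht⟩
      by_cases hpa : p a = true
      · rw [List.find?_cons_of_pos hpa] at hf
        cases hf
        rcases List.mem_cons.1 hx with rfl | hx'
        · exact le_refl _
        · exact ha x hx'
      · rw [List.find?_cons_of_neg (by simpa using hpa)] at hf
        rcases List.mem_cons.1 hx with rfl | hx'
        · exact absurd hpx hpa
        · exact ih ht hf hx'

-- ===== VERDICT (by name: the statement is the Claim_ definition above) =====
theorem extract_after_py_spec : Claim_equal_extract_after_py := by
  intro raw markers _
  show extract_after_py raw markers = extract_after_py_alt raw markers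
  simp only [extract_after_py, extract_after_py_alt]
  set lraw := PySem.Str.lower raw with hlraw
  set ms := PySem.List.sorted markers (fun m => PySem.Str.len m) true with hms
  have hgood : GoodA lraw ms (ms.foldl (aStep lraw) none) := by
    have h0 : GoodA lraw [] none := by simp [GoodA]
    simpa using foldA_good lraw ms [] none h0
  set lowered := ms.map (fun m => (PySem.Str.lower m).toList) with hlowered
  set L := lraw.toList with hL
  have hfind_eq : ∀ m : String, PySem.Str.find lraw (PySem.Str.lower m)
      = PySem.Chars.find L (PySem.Str.lower m).toList := by
    intro m
    rw [PySem.Str.find_eq, hL]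
  cases hacc : ms.foldl (aStep lraw) none with
  | none =>
      rw [hacc] at hgood
      simp only [GoodA] at hgood
      have hno : ∀ p ∈ lowered, ∀ q : Nat, ¬ (PySem.Chars.startswith (L.drop q) p = true) := by
        intro p hp q hsw
        obtain ⟨m, hm, rfl⟩ := List.mem_map.1 hp
        have hpre := (PySem.Chars.startswith_iff _ _).1 hsw
        have h0 := find_nonneg_of_prefix_drop hpre
        have hm1 := hgood m hm
        rw [hfind_eq m] at hm1
        rw [hm1] at h0
        omega
      exact (bScan_none raw L lowered hno (L.length + 1) 0).symm
  | some b =>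
      obtain ⟨bi, be, bm⟩ := b
      rw [hacc] at hgood
      simp only [GoodA] at hgood
      obtain ⟨hbi0, ⟨mw, hmw, hfw, hew⟩, hopt⟩ := hgood
      rw [hfind_eq mw] at hfw
      have hlenw : PySem.Str.len mw = ((PySem.Str.lower mw).toList.length : Int) := by
        rw [PySem.Str.len_eq, length_toList_lower]
      set i := bi.toNat with hi
      have hiL : i ≤ L.length := by
        have := PySem.Chars.find_le_length L (PySem.Str.lower mw).toList
        rw [hfw] at this
        omega
      have h1 : ∀ q : Nat, q < i → ∀ p ∈ lowered, ¬ (PySem.Chars.startswith (L.drop q) p = true) := by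
        intro q hq p hp hsw
        obtain ⟨m, hm, rfl⟩ := List.mem_map.1 hp
        have hpre := (PySem.Chars.startswith_iff _ _).1 hsw
        have hle := find_le_of_prefix_drop hpre
        have h0 := find_nonneg_of_prefix_drop hpre
        have hopt' := hopt m hm (by rw [hfind_eq m]; exact h0)
        rw [hfind_eq m] at hopt'
        omega
      have hswm : PySem.Chars.startswith (L.drop i) (PySem.Str.lower mw).toList = true := by
        rw [PySem.Chars.startswith_iff]
        have h0w : 0 ≤ PySem.Chars.find L (PySem.Str.lower mw).toList := by rw [hfw]; exact hbi0
        have hsp := (PySem.Chars.find_spec h0w).1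
        rw [hfw] at hsp
        rw [hi]
        exact hsp
      have hmem : (PySem.Str.lower mw).toList ∈ lowered := List.mem_map.2 ⟨mw, hmw, rfl⟩
      cases hfq : lowered.find? (fun m => PySem.Chars.startswith (L.drop i) m) with
      | none => exact absurd hswm (List.find?_eq_none.1 hfq _ hmem)
      | some p₀ =>
          have hp₀mem : p₀ ∈ lowered := List.mem_of_find?_eq_some hfq
          have hp₀true := List.find?_some hfq
          obtain ⟨m₀, hm₀, hm₀e⟩ := List.mem_map.1 hp₀mem
          have hpre₀ : p₀ <+: L.drop i := (PySem.Chars.startswith_iff _ _).1 (by simpa using hp₀true)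
          have hle₀ := find_le_of_prefix_drop hpre₀
          have h0₀ := find_nonneg_of_prefix_drop hpre₀
          have hopt₀ := hopt m₀ hm₀ (by rw [hfind_eq m₀, hm₀e]; exact h0₀)
          rw [hfind_eq m₀, hm₀e] at hopt₀
          have hfeq₀ : PySem.Chars.find L p₀ = bi := by omega
          have hlen₀ : PySem.Str.len m₀ = (p₀.length : Int) := by
            rw [PySem.Str.len_eq, ← hm₀e, length_toList_lower]
          have hup : bi + (p₀.length : Int) ≤ be := by
            have := hopt₀.2 hfeq₀
            omega
          have hpw : lowered.Pairwise (fun a b : List Char => b.length ≤ a.length) := by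
            have hs := PySem.List.sorted_pairwise_rev markers (fun m => PySem.Str.len m)
            rw [← hms] at hs
            refine List.pairwise_map.2 (hs.imp ?_)
            intro a b hab
            rw [PySem.Str.len_eq, PySem.Str.len_eq] at hab
            have ha := length_toList_lower a
            have hb := length_toList_lower b
            omega
          have hlow : ((PySem.Str.lower mw).toList).length ≤ p₀.length :=
            find?_max_len hpw hfq hmem hswm
          have hbe : be = bi + (p₀.length : Int) := by omega
          have hres := bScan_hit raw L lowered i hiL p₀ hfq 0 (Nat.zero_le _) h1
          simp only [Nat.sub_zero] at hres
          rw [hres]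
          have hstr : PySem.Str.slice raw (some be) none
              = String.ofList (raw.toList.drop (i + p₀.length)) := by
            apply String.toList_inj.mp
            rw [PySem.Str.toList_slice]
            simp only [PySem.Chars.slice_eq_listSlice]
            rw [PySem.List.slice_from raw.toList (by omega : (0:Int) ≤ be)]
            have hte : be.toNat = i + p₀.length := by omega
            simp [hte]
          show PySem.Str.stripChars (PySem.Str.slice raw (some be) none) " :,-\"'"
              = PySem.Str.stripChars (String.ofList (List.drop (i + p₀.length) raw.toList)) " :,-\"'"
          rw [hstr]
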